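-- pv_equiv track=rewrite | github.com/huwl404/NiLab | evolution/labelNSPs.py | merge_features
-- ===== SOURCE A (Python) =====
-- from itertools import zip_longest
--
-- def merge_features(base_info, tm, cd, others, structure):
--     """将四类特征合并为逐行格式"""
--     merged = []
--     first_line = True
--     for tm, cd, others, structure in zip_longest(tm, cd, others, structure, fillvalue={}):
--         row = {}
--         if first_line:
--             row = base_info.copy()
--             first_line = False
--         row.update({
--             "Uniprot_TM": tm.get("type", ''),
--             "TM_position": tm.get("position", ''),
--             "TM_description": tm.get("description", ''),
--             "Uniprot_Chain/Domain": cd.get("type", ''),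
--             "C/D_position": cd.get("position", ''),
--             "C/D_description": cd.get("description", ''),
--             "Uniprot_Others": others.get("type", ''),
--             "Others_position": others.get("position", ''),
--             "Others_description": others.get("description", ''),
--             "Predicted_Secondary_Structure": structure.get("type", ''),
--             "SS_position": structure.get("position", '')})
--         merged.append(row)
--     return merged
-- ===== SOURCE B (Python) =====
-- COLUMNS = [
--     ("tm", [("Uniprot_TM", "type"), ("TM_position", "position"),
--             ("TM_description", "description")]),
--     ("cd", [("Uniprot_Chain/Domain", "type"), ("C/D_position", "position"),
--             ("C/D_description", "description")]),
--     ("others", [("Uniprot_Others", "type"), ("Others_position", "position"),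
--                 ("Others_description", "description")]),
--     ("structure", [("Predicted_Secondary_Structure", "type"),
--                    ("SS_position", "position")]),
-- ]
--
--
-- def merge_features(base_info, tm, cd, others, structure):
--     """Merge the four feature lists into per-row dicts, column by column.
--
--     Instead of assembling each row in one pass, first lay out the skeleton of
--     all rows (row 0 seeded with base_info), then fill the table one output
--     column at a time: for each source list and each of its output keys, sweep
--     down all rows writing that single key.  Key insertion order per row is the
--     same as the row-major construction because every column is written in the
--     same left-to-right order for every row.
--     """
--     sources = {"tm": tm, "cd": cd, "others": others, "structure": structure}
--     n = max(len(tm), len(cd), len(others), len(structure))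
--     rows = [dict(base_info) if i == 0 else {} for i in range(n)]
--     for slot, keys in COLUMNS:
--         col = sources[slot]
--         for key, field in keys:
--             for i, row in enumerate(rows):
--                 row[key] = col[i].get(field, "") if i < len(col) else ""
--     return rows
-- ===== Notes on version B (the rewrite author's own statement) =====
-- stated objective: alternative
-- what changed: Replaces A's row-major zip_longest pass (building each row's 11 keys at once) by a column-major fill: first lay out the row skeletons (row 0 seeded with base_info), then for each source list and each of its output keys sweep down all rows writing that single column; correct because every column is written in the same left-to-right order for every row, so per-row key insertion order is unchanged.
import Mathlib
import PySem

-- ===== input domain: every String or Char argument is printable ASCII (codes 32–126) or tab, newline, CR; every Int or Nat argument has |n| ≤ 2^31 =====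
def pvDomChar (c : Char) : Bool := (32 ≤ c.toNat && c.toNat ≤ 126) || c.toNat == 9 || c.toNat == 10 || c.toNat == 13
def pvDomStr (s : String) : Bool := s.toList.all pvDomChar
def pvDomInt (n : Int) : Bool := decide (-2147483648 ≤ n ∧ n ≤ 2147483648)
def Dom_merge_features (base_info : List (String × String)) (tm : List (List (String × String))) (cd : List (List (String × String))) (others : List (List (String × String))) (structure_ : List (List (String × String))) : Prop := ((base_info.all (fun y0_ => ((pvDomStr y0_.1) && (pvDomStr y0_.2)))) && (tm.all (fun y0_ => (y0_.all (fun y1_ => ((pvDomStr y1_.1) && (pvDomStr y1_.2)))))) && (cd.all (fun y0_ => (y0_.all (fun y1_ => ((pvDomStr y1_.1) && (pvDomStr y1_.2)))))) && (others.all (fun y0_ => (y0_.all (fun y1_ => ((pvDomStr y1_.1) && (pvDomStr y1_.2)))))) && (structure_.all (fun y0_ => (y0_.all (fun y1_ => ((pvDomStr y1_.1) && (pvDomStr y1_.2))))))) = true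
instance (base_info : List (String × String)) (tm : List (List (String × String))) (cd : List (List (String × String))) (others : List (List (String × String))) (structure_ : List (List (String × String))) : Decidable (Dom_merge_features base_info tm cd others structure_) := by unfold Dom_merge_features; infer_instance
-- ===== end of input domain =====

-- B replaces A's row-major zip_longest pass (each row's 11 keys built at once) by a column-major
-- fill: row skeletons first, then one sweep down all rows per output key; objective: alternative.

-- ===== PORT A =====
-- zip_longest over four lists runs max-of-lengths iterations, reading each head (headD [] is the
-- fillvalue {}) and recursing on the tails; ported with that iteration count as a structural Nat.
def merge_features_go (base_info : List (String × String)) (first : Bool) : Nat → List (List (String × String)) → List (List (String × String)) → List (List (String × String)) → List (List (String × String)) → List (List (String × String))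
  | 0, _, _, _, _ => []
  | Nat.succ n, tm, cd, others, structure_ =>
    let t := tm.headD []
    let c := cd.headD []
    let o := others.headD []
    let s := structure_.headD []
    let row : PySem.Dict String String := PySem.Dict.mk (if first then base_info else [])
    let row :=
      ((((((((((row.insert "Uniprot_TM" ((PySem.Dict.mk t).getD "type" "")).insert
        "TM_position" ((PySem.Dict.mk t).getD "position" "")).insert
        "TM_description" ((PySem.Dict.mk t).getD "description" "")).insert
        "Uniprot_Chain/Domain" ((PySem.Dict.mk c).getD "type" "")).insert
        "C/D_position" ((PySem.Dict.mk c).getD "position" "")).insert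
        "C/D_description" ((PySem.Dict.mk c).getD "description" "")).insert
        "Uniprot_Others" ((PySem.Dict.mk o).getD "type" "")).insert
        "Others_position" ((PySem.Dict.mk o).getD "position" "")).insert
        "Others_description" ((PySem.Dict.mk o).getD "description" "")).insert
        "Predicted_Secondary_Structure" ((PySem.Dict.mk s).getD "type" "")).insert
        "SS_position" ((PySem.Dict.mk s).getD "position" "")
    row.items :: merge_features_go base_info false n tm.tail cd.tail others.tail structure_.tail

def merge_features (base_info : List (String × String)) (tm : List (List (String × String))) (cd : List (List (String × String))) (others : List (List (String × String))) (structure_ : List (List (String × String))) : List (List (String × String)) :=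
  merge_features_go base_info true (max (max tm.length cd.length) (max others.length structure_.length)) tm cd others structure_

-- ===== PORT B =====
-- the static COLUMNS table of Source B: per source slot, its (output key, field) pairs
def bColumns : List (String × List (String × String)) :=
  [("tm", [("Uniprot_TM", "type"), ("TM_position", "position"),
           ("TM_description", "description")]),
   ("cd", [("Uniprot_Chain/Domain", "type"), ("C/D_position", "position"),
           ("C/D_description", "description")]),
   ("others", [("Uniprot_Others", "type"), ("Others_position", "position"),
               ("Others_description", "description")]),
   ("structure", [("Predicted_Secondary_Structure", "type"),
                  ("SS_position", "position")])]

-- the inner two loops of Source B: for each (key, field) of one column, sweep down all rows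
-- (the Python mutates row in place; the sweep is ported as a map over enumerate)
def bFillColumn (col : List (List (String × String))) (keys : List (String × String))
    (rows : List (PySem.Dict String String)) : List (PySem.Dict String String) :=
  keys.foldl
    (fun rows kf =>
      (PySem.List.enumerate rows).map
        (fun ir => ir.2.insert kf.1
          (if ir.1 < (col.length : Int)
           then (PySem.Dict.mk (PySem.List.pyGetD col ir.1 [])).getD kf.2 ""
           else "")))
    rows

def merge_features_alt (base_info : List (String × String)) (tm : List (List (String × String))) (cd : List (List (String × String))) (others : List (List (String × String))) (structure_ : List (List (String × String))) : List (List (String × String)) :=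
  let sources : PySem.Dict String (List (List (String × String))) :=
    PySem.Dict.mk [("tm", tm), ("cd", cd), ("others", others), ("structure", structure_)]
  let n := max (max tm.length cd.length) (max others.length structure_.length)
  let rows : List (PySem.Dict String String) :=
    (List.range n).map (fun i => PySem.Dict.mk (if i = 0 then base_info else []))
  let rows := bColumns.foldl
    (fun rows sk => bFillColumn (sources.getD sk.1 []) sk.2 rows) rows
  rows.map (fun r => r.items)

-- ===== PRECONDITION & SPEC =====
def Spec_merge_features (base_info : List (String × String)) (tm : List (List (String × String))) (cd : List (List (String × String))) (others : List (List (String × String))) (structure_ : List (List (String × String))) (out : List (List (String × String))) : Prop := out = merge_features_alt base_info tm cd others structure_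
instance (base_info : List (String × String)) (tm : List (List (String × String))) (cd : List (List (String × String))) (others : List (List (String × String))) (structure_ : List (List (String × String))) (out : List (List (String × String))) : Decidable (Spec_merge_features base_info tm cd others structure_ out) := by unfold Spec_merge_features; infer_instance

-- ===== CLAIM (what is proved, stated in full; the proofs are below) =====
def Claim_equal_merge_features : Prop := ∀ (base_info : List (String × String)) (tm : List (List (String × String))) (cd : List (List (String × String))) (others : List (List (String × String))) (structure_ : List (List (String × String))), Dom_merge_features base_info tm cd others structure_ → Spec_merge_features base_info tm cd others structure_ (merge_features base_info tm cd others structure_)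

-- ===== LEMMAS AND PROOFS =====

-- the common 11-insert row, parameterised by the start dict and the four source rows
def chainR (start t c o s : List (String × String)) : PySem.Dict String String :=
  (((((((((((PySem.Dict.mk start).insert "Uniprot_TM" ((PySem.Dict.mk t).getD "type" "")).insert
    "TM_position" ((PySem.Dict.mk t).getD "position" "")).insert
    "TM_description" ((PySem.Dict.mk t).getD "description" "")).insert
    "Uniprot_Chain/Domain" ((PySem.Dict.mk c).getD "type" "")).insert
    "C/D_position" ((PySem.Dict.mk c).getD "position" "")).insert
    "C/D_description" ((PySem.Dict.mk c).getD "description" "")).insert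
    "Uniprot_Others" ((PySem.Dict.mk o).getD "type" "")).insert
    "Others_position" ((PySem.Dict.mk o).getD "position" "")).insert
    "Others_description" ((PySem.Dict.mk o).getD "description" "")).insert
    "Predicted_Secondary_Structure" ((PySem.Dict.mk s).getD "type" "")).insert
    "SS_position" ((PySem.Dict.mk s).getD "position" "")

lemma getD_tail {α : Type} (l : List (List α)) (i : Nat) :
    l.tail.getD i [] = l.getD (i + 1) [] := by cases l <;> rfl

lemma getD_zero {α : Type} (l : List (List α)) : l.getD 0 [] = l.headD [] := by cases l <;> rfl

-- A's loop as a map over the row indices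
lemma go_eq (base : List (String × String)) :
    ∀ (n : Nat) (first : Bool) (t c o s : List (List (String × String))),
    merge_features_go base first n t c o s =
      (List.range n).map
        (fun i => (chainR (if first = true ∧ i = 0 then base else [])
          (t.getD i []) (c.getD i []) (o.getD i []) (s.getD i [])).items) := by
  intro n
  induction n with
  | zero => intro first t c o s; rfl
  | succ n ih =>
    intro first t c o s
    rw [List.range_succ_eq_map, List.map_cons, List.map_map]
    show merge_features_go base first (n + 1) t c o s = _
    rw [merge_features_go, ih]
    refine congrArg₂ _ ?_ ?_
    · simp only [and_true]
      rw [← getD_zero t, ← getD_zero c, ← getD_zero o, ← getD_zero s]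
      simp [chainR]
    · refine List.map_congr_left ?_
      intro i _
      simp only [Function.comp]
      rw [getD_tail t, getD_tail c, getD_tail o, getD_tail s]
      simp

-- B's per-column value at row i, with the bounds check resolved
def colVal (col : List (List (String × String))) (i : Nat) (f : String) : String :=
  if (i : Int) < (col.length : Int)
  then (PySem.Dict.mk (PySem.List.pyGetD col (i : Int) [])).getD f ""
  else ""

lemma colVal_eq (col : List (List (String × String))) (i : Nat) (f : String) :
    colVal col i f = (PySem.Dict.mk (col.getD i [])).getD f "" := by
  unfold colVal
  split_ifs with h
  · rw [PySem.List.pyGetD_natCast]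
  · rw [List.getD_eq_default]
    · rfl
    · exact_mod_cast Int.not_lt.mp h

lemma enum_range_map {α : Type} (n : Nat) (g : Nat → α) :
    PySem.List.enumerate ((List.range n).map g) =
      (List.range n).map (fun (i : Nat) => ((i : Int), g i)) := by
  induction n with
  | zero => rfl
  | succ n ih =>
    rw [List.range_succ, List.map_append, List.map_append,
      PySem.List.enumerate_append, ih]
    simp [PySem.List.enumerate_cons, PySem.List.enumerate_nil]

-- one column pass over row skeletons indexed by range n = pointwise foldl of the keys
lemma bFillColumn_range (col : List (List (String × String))) (n : Nat) :
    ∀ (keys : List (String × String)) (g : Nat → PySem.Dict String String),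
    bFillColumn col keys ((List.range n).map g) =
      (List.range n).map
        (fun i => keys.foldl (fun r kf => r.insert kf.1 (colVal col i kf.2)) (g i)) := by
  intro keys
  induction keys with
  | nil => intro g; rfl
  | cons kf rest ih =>
    intro g
    show bFillColumn col rest _ = _
    beta_reduce
    rw [enum_range_map, List.map_map]
    simp only [List.foldl_cons]
    exact ih (fun i => (g i).insert kf.1 (colVal col i kf.2))

-- ===== VERDICT (by name: the statement is the Claim_ definition above) =====
theorem merge_features_spec : Claim_equal_merge_features := by
  intro base tm cd others structure_ _
  unfold Spec_merge_features merge_features merge_features_alt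
  rw [go_eq base _ true tm cd others structure_]
  simp only [bColumns, List.foldl, PySem.Dict.getD_eq_get?_getD, PySem.Dict.get?_mk_cons]
  norm_num
  rw [bFillColumn_range, bFillColumn_range, bFillColumn_range, bFillColumn_range, List.map_map]
  refine List.map_congr_left ?_
  intro i _
  simp only [Function.comp, List.foldl, colVal_eq]
  simp [chainR]
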